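-- pv_equiv track=rewrite | github.com/erfanzar/Calute | src/python/xerxes/streaming/loop.py | _find_any
-- ===== SOURCE A (Python) =====
-- def _find_any(text: str, tags: tuple[str, ...]) -> tuple[int, str]:
--     """Return (index, matched_tag) for the earliest tag found, or (-1, '')."""
--     earliest_idx = -1
--     earliest_tag = ""
--     for tag in tags:
--         idx = text.find(tag)
--         if idx != -1 and (earliest_idx == -1 or idx < earliest_idx):
--             earliest_idx = idx
--             earliest_tag = tag
--     return earliest_idx, earliest_tag
-- ===== SOURCE B (Python) =====
-- def _find_any(text: str, tags: tuple[str, ...]) -> tuple[int, str]: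
--     """Return (index, matched_tag) for the earliest tag found, or (-1, '')."""
--     for j in range(len(text) + 1):
--         for tag in tags:
--             if text.startswith(tag, j):
--                 return j, tag
--     return -1, ""
-- ===== Notes on version B (the rewrite author's own statement) =====
-- stated objective: alternative
-- what changed: Replaces the per-tag text.find minimum accumulator with a single left-to-right scan over positions that returns at the first position where any tag starts, checking tags in order to keep the tie-break.
import Mathlib
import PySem

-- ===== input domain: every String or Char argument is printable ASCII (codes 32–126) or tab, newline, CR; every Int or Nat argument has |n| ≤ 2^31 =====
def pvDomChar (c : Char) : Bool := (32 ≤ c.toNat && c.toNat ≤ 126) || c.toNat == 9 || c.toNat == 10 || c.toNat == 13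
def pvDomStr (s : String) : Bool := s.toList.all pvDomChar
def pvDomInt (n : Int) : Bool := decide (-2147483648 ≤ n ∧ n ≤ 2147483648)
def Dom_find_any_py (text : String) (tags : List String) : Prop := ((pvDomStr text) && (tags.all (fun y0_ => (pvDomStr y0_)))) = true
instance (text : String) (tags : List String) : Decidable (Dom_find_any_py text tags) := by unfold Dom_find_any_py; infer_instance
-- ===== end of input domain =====

-- B replaces A's per-tag text.find minimum accumulator with a single left-to-right
-- scan over positions, returning at the first position where any tag starts
-- (tags checked in order, preserving A's tie-break); alternative, similar cost.

-- ===== PORT A =====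
def find_any_py (text : String) (tags : List String) : Int × String :=
  tags.foldl (fun acc tag =>
    let idx := PySem.Str.find text tag
    if idx ≠ -1 ∧ (acc.1 = -1 ∨ idx < acc.1) then (idx, tag) else acc) (-1, "")

-- ===== PORT B =====
-- text.startswith(tag, j) for 0 ≤ j ≤ len(text) is exactly tag being a prefix of text[j:].
def scanB (s : List Char) (tags : List String) (j : Nat) : Nat → Int × String
  | 0 => (-1, "")
  | fuel+1 =>
    match tags.find? (fun t => PySem.Chars.startswith (s.drop j) t.toList) with
    | some t => ((j : Int), t)
    | none => scanB s tags (j+1) fuel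

def find_any_py_alt (text : String) (tags : List String) : Int × String :=
  scanB text.toList tags 0 (text.toList.length + 1)

-- ===== PRECONDITION & SPEC =====
def Spec_find_any_py (text : String) (tags : List String) (out : Int × String) : Prop := out = find_any_py_alt text tags
instance (text : String) (tags : List String) (out : Int × String) : Decidable (Spec_find_any_py text tags out) := by unfold Spec_find_any_py; infer_instance

-- ===== CLAIM (what is proved, stated in full; the proofs are below) =====
def Claim_equal_find_any_py : Prop := ∀ (text : String) (tags : List String), Dom_find_any_py text tags → Spec_find_any_py text tags (find_any_py text tags)

-- ===== LEMMAS AND PROOFS =====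

-- A's loop body, at the list-of-chars level.
def stepA (s : List Char) (acc : Int × String) (tag : String) : Int × String :=
  let idx := PySem.Chars.find s tag.toList
  if idx ≠ -1 ∧ (acc.1 = -1 ∨ idx < acc.1) then (idx, tag) else acc

theorem find_any_py_eq_fold (text : String) (tags : List String) :
    find_any_py text tags = tags.foldl (stepA text.toList) (-1, "") := by
  unfold find_any_py stepA
  simp

-- Invariant characterising A's accumulator after processing a prefix of the tags.
def InvA (s : List Char) (processed : List String) (acc : Int × String) : Prop :=
  (acc = (-1, "") ∧ ∀ t ∈ processed, PySem.Chars.find s t.toList = -1) ∨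
  (0 ≤ acc.1 ∧ PySem.Chars.find s acc.2.toList = acc.1 ∧
    (∀ t ∈ processed, PySem.Chars.find s t.toList = -1 ∨ acc.1 ≤ PySem.Chars.find s t.toList) ∧
    ∃ pre post, processed = pre ++ acc.2 :: post ∧
      ∀ t ∈ pre, PySem.Chars.find s t.toList ≠ acc.1)

theorem invA_step (s : List Char) (processed : List String) (acc : Int × String) (tag : String)
    (h : InvA s processed acc) : InvA s (processed ++ [tag]) (stepA s acc tag) := by
  unfold stepA
  set idx := PySem.Chars.find s tag.toList with hidx
  by_cases hne : idx ≠ -1 ∧ (acc.1 = -1 ∨ idx < acc.1)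
  · simp only [if_pos hne]
    obtain ⟨h1, h2⟩ := hne
    have hidx0 : 0 ≤ idx := by
      rcases (PySem.Chars.neg_one_le_find s tag.toList).lt_or_eq with h | h
      · omega
      · exact absurd h.symm h1
    refine Or.inr ⟨hidx0, hidx.symm, ?_, processed, [], by simp, ?_⟩
    · intro t ht
      rcases List.mem_append.1 ht with ht | ht
      · rcases h with ⟨_, hall⟩ | ⟨hpos, hfind, hmin, _⟩
        · exact Or.inl (hall t ht)
        · rcases h2 with h2 | h2
          · omega
          · rcases hmin t ht with hm | hm
            · exact Or.inl hm
            · exact Or.inr (by simp at *; omega)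
      · simp only [List.mem_singleton] at ht
        subst ht; exact Or.inr le_rfl
    · intro t ht
      rcases h with ⟨_, hall⟩ | ⟨hpos, hfind, hmin, _⟩
      · have := hall t ht; omega
      · rcases h2 with h2 | h2
        · omega
        · rcases hmin t ht with hm | hm
          · omega
          · omega
  · simp only [if_neg hne]
    push Not at hne
    rcases h with ⟨hacc, hall⟩ | ⟨hpos, hfind, hmin, pre, post, hsplit, hpre⟩
    · refine Or.inl ⟨hacc, ?_⟩
      intro t ht
      rcases List.mem_append.1 ht with ht | ht
      · exact hall t ht
      · simp only [List.mem_singleton] at ht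
        subst ht
        by_contra hcon
        have := hne hcon
        rw [hacc] at this
        simp at this
    · refine Or.inr ⟨hpos, hfind, ?_, pre, post ++ [tag], by simp [hsplit], hpre⟩
      intro t ht
      rcases List.mem_append.1 ht with ht | ht
      · exact hmin t ht
      · simp only [List.mem_singleton] at ht
        subst ht
        by_cases hc : PySem.Chars.find s t.toList = -1
        · exact Or.inl hc
        · have := hne hc
          right; omega

theorem invA_fold (s : List Char) (tags : List String) :
    ∀ (processed : List String) (acc : Int × String), InvA s processed acc →
      InvA s (processed ++ tags) (tags.foldl (stepA s) acc) := by
  induction tags with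
  | nil => intro processed acc h; simpa using h
  | cons t rest ih =>
    intro processed acc h
    have := ih (processed ++ [t]) (stepA s acc t) (invA_step s processed acc t h)
    simpa [List.append_assoc] using this

theorem invA_result (s : List Char) (tags : List String) :
    InvA s tags (tags.foldl (stepA s) (-1, "")) := by
  have := invA_fold s tags [] (-1, "") (Or.inl ⟨rfl, by simp⟩)
  simpa using this

-- a prefix of a suffix is an infix
theorem prefix_drop_infix {s t : List Char} {j : Nat} (h : t <+: s.drop j) : t <:+: s := by
  obtain ⟨r, hr⟩ := h
  exact ⟨s.take j, r, by rw [List.append_assoc, hr, List.take_append_drop]⟩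

-- a tag matches at position j iff its first occurrence is ≥ 0 and ≤ j (as Nat)
theorem match_at_le {s t : List Char} {j : Nat} (h : t <+: s.drop j) :
    0 ≤ PySem.Chars.find s t ∧ (PySem.Chars.find s t).toNat ≤ j := by
  have hinf : t <:+: s := prefix_drop_infix h
  have hpos : 0 ≤ PySem.Chars.find s t := (PySem.Chars.find_nonneg_iff s t).2 hinf
  refine ⟨hpos, ?_⟩
  by_contra hc
  exact ((PySem.Chars.find_spec (s := s) (sub := t) hpos).2 j (by omega)) h

theorem scanB_none (s : List Char) (tags : List String) :
    ∀ (fuel j : Nat),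
      (∀ i, j ≤ i → i < j + fuel →
        tags.find? (fun t => PySem.Chars.startswith (s.drop i) t.toList) = none) →
      scanB s tags j fuel = (-1, "") := by
  intro fuel
  induction fuel with
  | zero => intro j _; rfl
  | succ n ih =>
    intro j h
    have h0 := h j le_rfl (by omega)
    simp only [scanB, h0]
    exact ih (j+1) (fun i hi1 hi2 => h i (by omega) (by omega))

theorem scanB_some (s : List Char) (tags : List String) :
    ∀ (fuel j k : Nat) (t : String), j ≤ k → k < j + fuel →
      tags.find? (fun t => PySem.Chars.startswith (s.drop k) t.toList) = some t →
      (∀ i, j ≤ i → i < k →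
        tags.find? (fun t => PySem.Chars.startswith (s.drop i) t.toList) = none) →
      scanB s tags j fuel = ((k : Int), t) := by
  intro fuel
  induction fuel with
  | zero => intro j k t h1 h2; omega
  | succ n ih =>
    intro j k t h1 h2 hk hnone
    by_cases hjk : j = k
    · subst hjk
      simp only [scanB, hk]
    · have h0 := hnone j le_rfl (by omega)
      simp only [scanB, h0]
      exact ih (j+1) k t (by omega) (by omega) hk (fun i hi1 hi2 => hnone i (by omega) hi2)

-- ===== VERDICT (by name: the statement is the Claim_ definition above) =====
theorem find_any_py_spec : Claim_equal_find_any_py := by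
  intro text tags _
  unfold Spec_find_any_py find_any_py_alt
  rw [find_any_py_eq_fold]
  set s := text.toList with hs
  have hlen : PySem.Str.len text = s.length := by simp [PySem.Str.len, hs]
  rcases invA_result s tags with ⟨hacc, hall⟩ | ⟨hpos, hfind, hmin, pre, post, hsplit, hpre⟩
  · -- no tag occurs in the text: both return (-1, "")
    rw [hacc]
    symm
    apply scanB_none
    intro i _ _
    rw [List.find?_eq_none]
    intro t ht hsw
    have hpre : t.toList <+: s.drop i := (PySem.Chars.startswith_iff _ _).1 hsw
    have := (match_at_le hpre).1
    have := hall t ht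
    omega
  · -- some tag occurs: A's accumulator (acc.1, acc.2) is what the scan finds
    set acc := tags.foldl (stepA s) (-1, "") with hacc
    have hk : acc.1.toNat = acc.1 := Int.toNat_of_nonneg hpos
    -- in the whole tag list, matching at position acc.1 is equivalent to find = acc.1
    have key : ∀ t ∈ tags, (PySem.Chars.startswith (s.drop acc.1.toNat) t.toList = true) ↔
        PySem.Chars.find s t.toList = acc.1 := by
      intro t ht
      constructor
      · intro hsw
        have hpre' : t.toList <+: s.drop acc.1.toNat := (PySem.Chars.startswith_iff _ _).1 hsw
        obtain ⟨h0, hle⟩ := match_at_le hpre'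
        rcases hmin t ht with hm | hm
        · omega
        · omega
      · intro hf
        apply (PySem.Chars.startswith_iff _ _).2
        have h0 : 0 ≤ PySem.Chars.find s t.toList := by omega
        have := (PySem.Chars.find_spec (s := s) (sub := t.toList) h0).1
        rwa [hf] at this
    have hmain : scanB s tags 0 (s.length + 1) = ((acc.1.toNat : Int), acc.2) := by
      apply scanB_some s tags (s.length + 1) 0 acc.1.toNat acc.2 (by omega)
      · have : acc.1 ≤ s.length := by
          rw [← hfind]; exact PySem.Chars.find_le_length s acc.2.toList
        omega
      · -- the find? over tags at position acc.1 yields acc.2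
        rw [hsplit, List.find?_append]
        have hprenone : pre.find? (fun t => PySem.Chars.startswith (s.drop acc.1.toNat) t.toList) = none := by
          rw [List.find?_eq_none]
          intro t ht
          simp only [Bool.not_eq_true]
          rw [Bool.eq_false_iff]
          intro hsw
          have htmem : t ∈ tags := by rw [hsplit]; simp [ht]
          exact hpre t ht ((key t htmem).1 hsw)
        rw [hprenone]
        simp only [Option.none_or, List.find?_cons]
        have : PySem.Chars.startswith (s.drop acc.1.toNat) acc.2.toList = true := by
          apply (key acc.2 (by rw [hsplit]; simp)).2 hfind
        rw [this]
      · -- no tag matches strictly before acc.1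
        intro i _ hi
        rw [List.find?_eq_none]
        intro t ht hsw
        have hpre' : t.toList <+: s.drop i := (PySem.Chars.startswith_iff _ _).1 hsw
        obtain ⟨h0, hle⟩ := match_at_le hpre'
        rcases hmin t ht with hm | hm
        · omega
        · omega
    rw [hmain, hk]
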